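-- pv_equiv track=rewrite | github.com/xiaofanc/leetcode | tiktok/inversions.py | inversions2
-- ===== SOURCE A (Python) =====
-- def inversions2(arr):
-- 	res = 0
-- 	n = len(arr)
-- 	visited_curr = set()
-- 	for i in range(1, n-1):
-- 		if arr[i] in visited_curr:
-- 			continue
-- 		visited_curr.add(arr[i])
-- 		small = 0
-- 		visited = set()
-- 		for j in range(i+1, n):
-- 			if arr[j] in visited or arr[j] > arr[i]:
-- 				continue
-- 			visited.add(arr[j])
-- 			if arr[j] < arr[i]:
-- 				small += 1
--
-- 		great = 0
-- 		visited = set()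
-- 		for j in range(i-1,-1,-1):
-- 			if arr[j] in visited or arr[j] < arr[i]:
-- 				continue
-- 			visited.add(arr[j])
-- 			if arr[j] > arr[i]:
-- 				great += 1
-- 		res += small * great
-- 	return res
-- ===== SOURCE B (Python) =====
-- def _bisect_left(a, x):
--     lo, hi = 0, len(a)
--     while lo < hi:
--         mid = (lo + hi) // 2
--         if a[mid] < x:
--             lo = mid + 1
--         else:
--             hi = mid
--     return lo
--
-- def _bisect_right(a, x):
--     lo, hi = 0, len(a)
--     while lo < hi:
--         mid = (lo + hi) // 2
--         if a[mid] <= x: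
--             lo = mid + 1
--         else:
--             hi = mid
--     return lo
--
-- def inversions2(arr):
--     n = len(arr)
--     # backward sweep: smalls[i] = number of distinct values < arr[i] in arr[i+1:]
--     smalls = {}
--     sl, present = [], set()
--     for i in range(n - 2, 0, -1):
--         x = arr[i + 1]
--         if x not in present:
--             present.add(x)
--             sl.insert(_bisect_right(sl, x), x)
--         smalls[i] = _bisect_left(sl, arr[i])
--     # forward sweep: distinct values > arr[i] in arr[:i]; sum over first middle occurrences
--     res = 0
--     sl, present, seen = [], set(), set()
--     for i in range(1, n - 1):
--         x = arr[i - 1]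
--         if x not in present:
--             present.add(x)
--             sl.insert(_bisect_right(sl, x), x)
--         v = arr[i]
--         if v not in seen:
--             seen.add(v)
--             res += smalls[i] * (len(sl) - _bisect_right(sl, v))
--     return res
-- ===== Notes on version B (the rewrite author's own statement) =====
-- stated objective: faster
-- what changed: Replaces A's per-middle rescans of the whole prefix/suffix with two sweeps (one backward, one forward) that maintain a sorted list of the distinct values seen so far and count distinct smaller/greater values by hand-written binary search.
import Mathlib
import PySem

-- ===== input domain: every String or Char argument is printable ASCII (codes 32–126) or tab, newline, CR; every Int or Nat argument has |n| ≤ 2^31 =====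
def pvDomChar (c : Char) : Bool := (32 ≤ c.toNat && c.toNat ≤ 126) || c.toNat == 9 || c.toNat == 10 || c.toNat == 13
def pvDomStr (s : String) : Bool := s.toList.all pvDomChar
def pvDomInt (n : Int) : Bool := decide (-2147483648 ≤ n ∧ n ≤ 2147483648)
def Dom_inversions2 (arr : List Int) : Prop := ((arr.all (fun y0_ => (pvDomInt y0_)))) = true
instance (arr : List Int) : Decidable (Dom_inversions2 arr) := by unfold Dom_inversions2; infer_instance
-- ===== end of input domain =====

-- B replaces A's per-middle rescans by two sweeps over the array that maintain a sorted list of the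
-- distinct values seen so far and count distinct smaller/greater values by binary search (measured faster).

-- ===== PORT A =====
-- loop body of A's first inner loop ('for j in range(i+1, n)'), ai = arr[i]
def aSmallStep (ai : Int) (t : Int × PySem.Set Int) (aj : Int) : Int × PySem.Set Int :=
  if PySem.Set.contains t.2 aj || decide (ai < aj) then t
  else ((if aj < ai then t.1 + 1 else t.1), PySem.Set.add t.2 aj)

-- loop body of A's second inner loop ('for j in range(i-1, -1, -1)')
def aGreatStep (ai : Int) (t : Int × PySem.Set Int) (aj : Int) : Int × PySem.Set Int :=
  if PySem.Set.contains t.2 aj || decide (aj < ai) then t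
  else ((if ai < aj then t.1 + 1 else t.1), PySem.Set.add t.2 aj)

-- A's 'small' inner loop; all indices arr[j] are in range, so pyGetD is exact
def aSmall (arr : List Int) (ai i n : Int) : Int :=
  ((PySem.List.pyRange (i+1) n 1).foldl
    (fun t j => aSmallStep ai t (PySem.List.pyGetD arr j 0)) ((0:Int), PySem.Set.empty)).1

-- A's 'great' inner loop
def aGreat (arr : List Int) (ai i : Int) : Int :=
  ((PySem.List.pyRange (i-1) (-1) (-1)).foldl
    (fun t j => aGreatStep ai t (PySem.List.pyGetD arr j 0)) ((0:Int), PySem.Set.empty)).1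

def inversions2 (arr : List Int) : Int :=
  let n : Int := PySem.List.len arr
  (((PySem.List.pyRange 1 (n-1) 1).foldl (fun (s : Int × PySem.Set Int) i =>
      let ai := PySem.List.pyGetD arr i 0   -- arr[i]; i is always in range
      if PySem.Set.contains s.2 ai then s
      else (s.1 + aSmall arr ai i n * aGreat arr ai i, PySem.Set.add s.2 ai))
    ((0:Int), PySem.Set.empty))).1

-- ===== PORT B =====
-- hand-written binary search of Source B, step for step (the while loop as recursion on hi-lo)
def blLoop (a : List Int) (x : Int) (lo hi : Int) : Int :=
  if _h : lo < hi then
    let mid := PySem.Int.floordiv (lo + hi) 2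
    if PySem.List.pyGetD a mid 0 < x then blLoop a x (mid + 1) hi
    else blLoop a x lo mid
  else lo
termination_by (hi - lo).toNat
decreasing_by
  all_goals
    have hm : (lo + hi).fdiv 2 = (lo + hi) / 2 := by rw [Int.fdiv_eq_ediv]; simp
    simp only [PySem.Int.floordiv, hm] at *
    omega

def brLoop (a : List Int) (x : Int) (lo hi : Int) : Int :=
  if _h : lo < hi then
    let mid := PySem.Int.floordiv (lo + hi) 2
    if PySem.List.pyGetD a mid 0 ≤ x then brLoop a x (mid + 1) hi
    else brLoop a x lo mid
  else lo
termination_by (hi - lo).toNat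
decreasing_by
  all_goals
    have hm : (lo + hi).fdiv 2 = (lo + hi) / 2 := by rw [Int.fdiv_eq_ediv]; simp
    simp only [PySem.Int.floordiv, hm] at *
    omega

def pyBisectLeft (a : List Int) (x : Int) : Int := blLoop a x 0 (PySem.List.len a)
def pyBisectRight (a : List Int) (x : Int) : Int := brLoop a x 0 (PySem.List.len a)

-- body of B's backward sweep; state = (smalls, sl, present)
def backStep (arr : List Int) (s : PySem.Dict Int Int × List Int × PySem.Set Int) (i : Int) :
    PySem.Dict Int Int × List Int × PySem.Set Int :=
  let x := PySem.List.pyGetD arr (i+1) 0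
  let slp : List Int × PySem.Set Int :=
    if PySem.Set.contains s.2.2 x then s.2
    else (PySem.List.insert s.2.1 (pyBisectRight s.2.1 x) x, PySem.Set.add s.2.2 x)
  (PySem.Dict.insert s.1 i (pyBisectLeft slp.1 (PySem.List.pyGetD arr i 0)), slp.1, slp.2)

-- body of B's forward sweep; state = (res, sl, present, seen); 'smalls[i]' is ported as getD
-- (exact: the backward sweep stores a value for every i in range(1, n-1))
def fwdStep (arr : List Int) (smalls : PySem.Dict Int Int)
    (s : Int × List Int × PySem.Set Int × PySem.Set Int) (i : Int) :
    Int × List Int × PySem.Set Int × PySem.Set Int :=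
  let x := PySem.List.pyGetD arr (i-1) 0
  let slp : List Int × PySem.Set Int :=
    if PySem.Set.contains s.2.2.1 x then (s.2.1, s.2.2.1)
    else (PySem.List.insert s.2.1 (pyBisectRight s.2.1 x) x, PySem.Set.add s.2.2.1 x)
  let v := PySem.List.pyGetD arr i 0
  if PySem.Set.contains s.2.2.2 v then (s.1, slp.1, slp.2, s.2.2.2)
  else (s.1 + PySem.Dict.getD smalls i 0 * (PySem.List.len slp.1 - pyBisectRight slp.1 v),
        slp.1, slp.2, PySem.Set.add s.2.2.2 v)

def inversions2_alt (arr : List Int) : Int :=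
  let n : Int := PySem.List.len arr
  let back := (PySem.List.pyRange (n-2) 0 (-1)).foldl (backStep arr)
    (PySem.Dict.empty, ([] : List Int), PySem.Set.empty)
  let fwd := (PySem.List.pyRange 1 (n-1) 1).foldl (fwdStep arr back.1)
    ((0:Int), ([] : List Int), PySem.Set.empty, PySem.Set.empty)
  fwd.1

-- ===== PRECONDITION & SPEC =====
def Spec_inversions2 (arr : List Int) (out : Int) : Prop := out = inversions2_alt arr
instance (arr : List Int) (out : Int) : Decidable (Spec_inversions2 arr out) := by unfold Spec_inversions2; infer_instance

-- ===== CLAIM (what is proved, stated in full; the proofs are below) =====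
def Claim_equal_inversions2 : Prop := ∀ (arr : List Int), Dom_inversions2 arr → Spec_inversions2 arr (inversions2 arr)

-- ===== LEMMAS AND PROOFS =====

-- number of distinct values of ws below / above v
def cntLT (ws : List Int) (v : Int) : Int := ((ws.toFinset.filter (fun x => x < v)).card : Int)
def cntGT (ws : List Int) (v : Int) : Int := ((ws.toFinset.filter (fun x => v < x)).card : Int)

-- the common abstraction of both programs' outer loop over the middles
def midStep (arr : List Int) (s : Int × PySem.Set Int) (i : Int) : Int × PySem.Set Int :=
  let v := PySem.List.pyGetD arr i 0
  if PySem.Set.contains s.2 v then s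
  else (s.1 + cntLT (arr.drop (i.toNat+1)) v * cntGT (arr.take i.toNat) v, PySem.Set.add s.2 v)

-- generic form of A's inner loops: a skip/count/record loop counts distinct good values
def cStep (bad good : Int → Bool) (t : Int × PySem.Set Int) (x : Int) : Int × PySem.Set Int :=
  if PySem.Set.contains t.2 x || bad x then t
  else ((if good x then t.1 + 1 else t.1), PySem.Set.add t.2 x)

theorem distinctCountFold (bad good : Int → Bool) (hbg : ∀ x, good x = true → bad x = false) :
    ∀ (ws : List Int) (c : Int) (vis : PySem.Set Int),
      (ws.foldl (cStep bad good) (c, vis)).1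
        = c + (((ws.toFinset.filter (fun x => good x = true)) \ vis.toFinset).card : Int) := by
  intro ws
  induction ws with
  | nil => intro c vis; simp
  | cons x t ih =>
    intro c vis
    simp only [List.foldl_cons]
    by_cases hv : PySem.Set.contains vis x = true
    · rw [show cStep bad good (c, vis) x = (c, vis) from by
        unfold cStep; rw [if_pos (by rw [hv]; rfl)]]
      rw [ih]
      have hx : x ∈ vis.toFinset := by
        simp only [List.mem_toFinset]
        simpa [PySem.Set.contains, List.contains_iff_mem] using hv
      congr 2
      rw [List.toFinset_cons, Finset.filter_insert]
      split
      · rw [Finset.insert_sdiff_of_mem _ hx]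
      · rfl
    · have hxv : x ∉ vis.toFinset := by
        simp only [List.mem_toFinset]
        intro h
        exact hv (by simpa [PySem.Set.contains, List.contains_iff_mem] using h)
      by_cases hb : bad x = true
      · have hg : good x = false := by
          cases hgx : good x
          · rfl
          · exact absurd (hbg x hgx) (by simp [hb])
        rw [show cStep bad good (c, vis) x = (c, vis) from by
          unfold cStep; rw [if_pos (by rw [hb]; simp)]]
        rw [ih]
        congr 2
        rw [List.toFinset_cons, Finset.filter_insert, if_neg (by simp [hg])]
      · have hv0 : PySem.Set.contains vis x = false := by
          cases h : PySem.Set.contains vis x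
          · rfl
          · exact absurd h hv
        have hb0 : bad x = false := by
          cases h : bad x
          · rfl
          · exact absurd h hb
        have hxl : x ∉ vis := by simpa using hxv
        have hstep : cStep bad good (c, vis) x
            = ((if good x then c + 1 else c), PySem.Set.add vis x) := by
          unfold cStep; rw [if_neg (by rw [hv0, hb0]; simp)]
        rw [hstep, ih]
        have hadd : (PySem.Set.add vis x).toFinset = insert x vis.toFinset := by
          have : PySem.Set.add vis x = vis ++ [x] := by
            unfold PySem.Set.add; rw [if_neg (by rw [hv0]; simp)]
          rw [this]
          ext y; simp
        rw [hadd, List.toFinset_cons, Finset.filter_insert]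
        set S := t.toFinset.filter (fun y => good y = true) with hS
        by_cases hg : good x = true
        · rw [if_pos hg]
          by_cases hxS : x ∈ S
          · have h1 : insert x S = S := Finset.insert_eq_self.mpr hxS
            have h2 : S \ insert x vis.toFinset = (S \ vis.toFinset).erase x := by
              ext y; simp [Finset.mem_sdiff, Finset.mem_erase]; tauto
            have hxSV : x ∈ S \ vis.toFinset := Finset.mem_sdiff.mpr ⟨hxS, hxv⟩
            have h3 := Finset.card_erase_of_mem hxSV
            have h4 : 1 ≤ (S \ vis.toFinset).card := Finset.card_pos.mpr ⟨x, hxSV⟩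
            rw [hg]; rw [if_pos rfl, h1, h2, h3]
            push_cast [Nat.cast_sub h4]
            ring
          · have h2 : S \ insert x vis.toFinset = S \ vis.toFinset := by
              ext y; simp [Finset.mem_sdiff]; intro hy _; exact fun he => absurd (he ▸ hy) hxS
            have h5 : insert x S \ vis.toFinset = insert x (S \ vis.toFinset) := by
              ext y; simp [Finset.mem_sdiff]; constructor
              · rintro ⟨h | h, hnv⟩
                · exact Or.inl h
                · exact Or.inr ⟨h, hnv⟩
              · rintro (h | ⟨h, hnv⟩)
                · exact ⟨Or.inl h, h ▸ hxl⟩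
                · exact ⟨Or.inr h, hnv⟩
            have hxSV : x ∉ S \ vis.toFinset := fun h => hxS (Finset.mem_sdiff.mp h).1
            rw [hg]; rw [if_pos rfl, h2, h5, Finset.card_insert_of_notMem hxSV]
            push_cast
            ring
        · have hg' : good x = false := by cases hgx : good x; rfl; exact absurd hgx hg
          have hxS : x ∉ S := fun h => by
            rw [hS] at h
            exact absurd (Finset.mem_filter.mp h).2 (by simp [hg'])
          have he : S \ insert x vis.toFinset = S \ vis.toFinset := by
            ext y
            simp only [Finset.mem_sdiff, Finset.mem_insert, not_or]
            constructor
            · rintro ⟨hy, _, hnv⟩; exact ⟨hy, hnv⟩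
            · rintro ⟨hy, hnv⟩; exact ⟨hy, fun heq => absurd (heq ▸ hy) hxS, hnv⟩
          rw [if_neg (by simp [hg']), if_neg (by simp [hg']), he]

theorem aSmall_eq (arr : List Int) (ai i : Int) (h0 : 0 ≤ i) :
    aSmall arr ai i (PySem.List.len arr) = cntLT (arr.drop (i.toNat + 1)) ai := by
  have hbg : ∀ x : Int, (fun y => decide (y < ai)) x = true → (fun y => decide (ai < y)) x = false := by
    intro x h
    simp only [decide_eq_true_eq] at h
    simp only [decide_eq_false_iff_not]
    omega
  have hstep : (fun (t : Int × PySem.Set Int) j => aSmallStep ai t (PySem.List.pyGetD arr j 0))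
      = fun t j => cStep (fun y => decide (ai < y)) (fun y => decide (y < ai)) t
          (PySem.List.pyGetD arr j 0) := by
    funext t j
    unfold aSmallStep cStep
    simp only [decide_eq_true_eq]
  unfold aSmall
  rw [hstep]
  have hm : List.foldl
        (fun (t : Int × PySem.Set Int) j => cStep (fun y => decide (ai < y)) (fun y => decide (y < ai)) t
          (PySem.List.pyGetD arr j 0)) (((0:Int), PySem.Set.empty))
        (PySem.List.pyRange (i+1) (PySem.List.len arr) 1)
      = List.foldl (cStep (fun y => decide (ai < y)) (fun y => decide (y < ai)))
          (((0:Int), PySem.Set.empty))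
          ((PySem.List.pyRange (i+1) (PySem.List.len arr) 1).map (fun j => PySem.List.pyGetD arr j 0)) :=
    List.foldl_map.symm
  rw [hm]
  rw [PySem.List.map_pyGetD_pyRange arr 0 (by omega : (0:Int) ≤ i + 1)]
  rw [distinctCountFold _ _ hbg]
  have ht : (i+1).toNat = i.toNat + 1 := by omega
  rw [ht]
  unfold cntLT
  have hempty : (PySem.Set.empty : PySem.Set Int).toFinset = (∅ : Finset Int) := rfl
  rw [hempty, Finset.sdiff_empty]
  norm_num

theorem map_pyGetD_range_take (arr : List Int) (i : Int) (h0 : 0 ≤ i) (h1 : i ≤ PySem.List.len arr) :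
    (PySem.List.pyRange 0 i 1).map (fun j => PySem.List.pyGetD arr j 0) = arr.take i.toNat := by
  have hz := PySem.List.map_pyGetD_pyRange_zero arr 0
  rw [PySem.List.pyRange_one_append 0 i (PySem.List.len arr) h0 h1, List.map_append,
      PySem.List.map_pyGetD_pyRange arr 0 h0] at hz
  have htd := List.take_append_drop i.toNat arr
  exact List.append_cancel_right (hz.trans htd.symm)

theorem aGreat_eq (arr : List Int) (ai i : Int) (h0 : 0 ≤ i) (h1 : i ≤ PySem.List.len arr) :
    aGreat arr ai i = cntGT (arr.take i.toNat) ai := by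
  have hbg : ∀ x : Int, (fun y => decide (ai < y)) x = true → (fun y => decide (y < ai)) x = false := by
    intro x h
    simp only [decide_eq_true_eq] at h
    simp only [decide_eq_false_iff_not]
    omega
  have hstep : (fun (t : Int × PySem.Set Int) j => aGreatStep ai t (PySem.List.pyGetD arr j 0))
      = fun t j => cStep (fun y => decide (y < ai)) (fun y => decide (ai < y)) t
          (PySem.List.pyGetD arr j 0) := by
    funext t j
    unfold aGreatStep cStep
    simp only [decide_eq_true_eq]
  unfold aGreat
  rw [hstep]
  have hrev : PySem.List.pyRange (i-1) (-1) (-1) = (PySem.List.pyRange 0 i 1).reverse := by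
    have := PySem.List.pyRange_neg_one_eq_reverse (i-1) (-1)
    norm_num at this
    exact this
  rw [hrev]
  have hm : List.foldl
        (fun (t : Int × PySem.Set Int) j => cStep (fun y => decide (y < ai)) (fun y => decide (ai < y)) t
          (PySem.List.pyGetD arr j 0)) (((0:Int), PySem.Set.empty))
        ((PySem.List.pyRange 0 i 1).reverse)
      = List.foldl (cStep (fun y => decide (y < ai)) (fun y => decide (ai < y)))
          (((0:Int), PySem.Set.empty))
          (((PySem.List.pyRange 0 i 1).reverse).map (fun j => PySem.List.pyGetD arr j 0)) :=
    List.foldl_map.symm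
  rw [hm, List.map_reverse, map_pyGetD_range_take arr i h0 h1, distinctCountFold _ _ hbg]
  unfold cntGT
  have hempty : (PySem.Set.empty : PySem.Set Int).toFinset = (∅ : Finset Int) := rfl
  rw [hempty, Finset.sdiff_empty, List.toFinset_reverse]
  norm_num

theorem A_eq_mid (arr : List Int) :
    inversions2 arr
      = ((PySem.List.pyRange 1 (PySem.List.len arr - 1) 1).foldl (midStep arr)
          ((0:Int), PySem.Set.empty)).1 := by
  unfold inversions2
  dsimp only
  congr 1
  apply PySem.List.foldl_congr_mem
  intro acc i hi
  rw [PySem.List.mem_pyRange_one] at hi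
  unfold midStep
  dsimp only
  by_cases hc : PySem.Set.contains acc.2 (PySem.List.pyGetD arr i 0) = true
  · rw [if_pos hc, if_pos hc]
  · rw [if_neg hc, if_neg hc]
    rw [aSmall_eq arr _ i (by omega), aGreat_eq arr _ i (by omega)]
    have : i ≤ PySem.List.len arr := by
      have h2 := hi.2
      simp only [PySem.List.len] at *
      omega
    exact this

-- binary-search loop characterisation
theorem blLoop_spec (a : List Int) (x : Int) (ha : a.Pairwise (· ≤ ·)) :
    ∀ (lo hi : Int), 0 ≤ lo → lo ≤ hi → hi ≤ (a.length : Int) →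
      (∀ (j : Nat) (hj : j < a.length), (j : Int) < lo → a[j] < x) →
      (∀ (j : Nat) (hj : j < a.length), hi ≤ (j : Int) → x ≤ a[j]) →
      0 ≤ blLoop a x lo hi ∧ blLoop a x lo hi ≤ (a.length : Int) ∧
        (∀ (j : Nat) (hj : j < a.length), ((j : Int) < blLoop a x lo hi ↔ a[j] < x)) := by
  have hpw := List.pairwise_iff_getElem.mp ha
  intro lo hi
  fun_induction blLoop a x lo hi with
  | case1 lo hi hlt mid hmidlt ih =>
    intro h0 hlh hh hlow hhigh
    have hmid : lo ≤ mid ∧ mid < hi := by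
      have hm2 : (lo + hi).fdiv 2 = (lo + hi) / 2 := by rw [Int.fdiv_eq_ediv]; simp
      simp only [mid, PySem.Int.floordiv, hm2]
      omega
    have hmlen : mid < (a.length : Int) := by omega
    have hget : PySem.List.pyGetD a mid 0 = a[mid.toNat]'(by omega) :=
      PySem.List.pyGetD_eq_getElem a 0 (by omega) hmlen
    apply ih (by omega) (by omega) hh
    · intro j hj hjlt
      rcases Nat.lt_or_ge j mid.toNat with h | h
      · exact lt_of_le_of_lt (hpw j mid.toNat hj (by omega) h) (hget ▸ hmidlt)
      · have hje : j = mid.toNat := by omega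
        subst hje
        exact hget ▸ hmidlt
    · exact hhigh
  | case2 lo hi hlt mid hmidge ih =>
    intro h0 hlh hh hlow hhigh
    have hmid : lo ≤ mid ∧ mid < hi := by
      have hm2 : (lo + hi).fdiv 2 = (lo + hi) / 2 := by rw [Int.fdiv_eq_ediv]; simp
      simp only [mid, PySem.Int.floordiv, hm2]
      omega
    have hmlen : mid < (a.length : Int) := by omega
    have hget : PySem.List.pyGetD a mid 0 = a[mid.toNat]'(by omega) :=
      PySem.List.pyGetD_eq_getElem a 0 (by omega) hmlen
    apply ih h0 (by omega) (by omega) hlow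
    intro j hj hjge
    have hx : x ≤ a[mid.toNat]'(by omega) := by
      rw [← hget]; omega
    rcases Nat.lt_or_ge mid.toNat j with h | h
    · exact le_trans hx (hpw mid.toNat j (by omega) hj h)
    · have hje : j = mid.toNat := by omega
      subst hje
      exact hx
  | case3 lo hi hnlt =>
    intro h0 hlh hh hlow hhigh
    refine ⟨h0, by omega, ?_⟩
    intro j hj
    constructor
    · intro hjlt
      exact hlow j hj hjlt
    · intro haj
      by_contra hge
      have := hhigh j hj (by omega)
      omega

theorem brLoop_spec (a : List Int) (x : Int) (ha : a.Pairwise (· ≤ ·)) :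
    ∀ (lo hi : Int), 0 ≤ lo → lo ≤ hi → hi ≤ (a.length : Int) →
      (∀ (j : Nat) (hj : j < a.length), (j : Int) < lo → a[j] ≤ x) →
      (∀ (j : Nat) (hj : j < a.length), hi ≤ (j : Int) → x < a[j]) →
      0 ≤ brLoop a x lo hi ∧ brLoop a x lo hi ≤ (a.length : Int) ∧
        (∀ (j : Nat) (hj : j < a.length), ((j : Int) < brLoop a x lo hi ↔ a[j] ≤ x)) := by
  have hpw := List.pairwise_iff_getElem.mp ha
  intro lo hi
  fun_induction brLoop a x lo hi with
  | case1 lo hi hlt mid hmidle ih =>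
    intro h0 hlh hh hlow hhigh
    have hmid : lo ≤ mid ∧ mid < hi := by
      have hm2 : (lo + hi).fdiv 2 = (lo + hi) / 2 := by rw [Int.fdiv_eq_ediv]; simp
      simp only [mid, PySem.Int.floordiv, hm2]
      omega
    have hmlen : mid < (a.length : Int) := by omega
    have hget : PySem.List.pyGetD a mid 0 = a[mid.toNat]'(by omega) :=
      PySem.List.pyGetD_eq_getElem a 0 (by omega) hmlen
    apply ih (by omega) (by omega) hh
    · intro j hj hjlt
      rcases Nat.lt_or_ge j mid.toNat with h | h
      · exact le_trans (hpw j mid.toNat hj (by omega) h) (hget ▸ hmidle)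
      · have hje : j = mid.toNat := by omega
        subst hje
        exact hget ▸ hmidle
    · exact hhigh
  | case2 lo hi hlt mid hmidgt ih =>
    intro h0 hlh hh hlow hhigh
    have hmid : lo ≤ mid ∧ mid < hi := by
      have hm2 : (lo + hi).fdiv 2 = (lo + hi) / 2 := by rw [Int.fdiv_eq_ediv]; simp
      simp only [mid, PySem.Int.floordiv, hm2]
      omega
    have hmlen : mid < (a.length : Int) := by omega
    have hget : PySem.List.pyGetD a mid 0 = a[mid.toNat]'(by omega) :=
      PySem.List.pyGetD_eq_getElem a 0 (by omega) hmlen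
    apply ih h0 (by omega) (by omega) hlow
    intro j hj hjge
    have hx : x < a[mid.toNat]'(by omega) := by
      rw [← hget]; omega
    rcases Nat.lt_or_ge mid.toNat j with h | h
    · exact lt_of_lt_of_le hx (hpw mid.toNat j (by omega) hj h)
    · have hje : j = mid.toNat := by omega
      subst hje
      exact hx
  | case3 lo hi hnlt =>
    intro h0 hlh hh hlow hhigh
    refine ⟨h0, by omega, ?_⟩
    intro j hj
    constructor
    · intro hjlt
      exact hlow j hj hjlt
    · intro haj
      by_contra hge
      have := hhigh j hj (by omega)
      omega

theorem countP_index (p : Int → Bool) :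
    ∀ (a : List Int) (r : Nat), r ≤ a.length →
      (∀ (j : Nat) (hj : j < a.length), p a[j] = true ↔ j < r) → a.countP p = r := by
  intro a
  induction a with
  | nil =>
    intro r hr _
    simp at hr ⊢
    omega
  | cons x t ih =>
    intro r hr h
    have h0 := h 0 (by simp)
    rw [List.countP_cons]
    cases r with
    | zero =>
      have hx : p x = false := by
        cases hp : p x
        · rfl
        · exact absurd (h0.mp (by simpa using hp)) (by omega)
      have ht : t.countP p = 0 := by
        apply ih 0 (by omega)
        intro j hj
        have := h (j+1) (by simp; omega)
        simpa using this
      simp [ht, hx]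
    | succ k =>
      have hx : p x = true := h0.mpr (by omega)
      have ht : t.countP p = k := by
        apply ih k (by simp at hr; omega)
        intro j hj
        have h2 := h (j+1) (by simp; omega)
        simpa [Nat.succ_lt_succ_iff] using h2
      simp [ht, hx]

theorem len_eq_int (a : List Int) : PySem.List.len a = (a.length : Int) := by
  simp [PySem.List.len]

theorem bisectLeft_cnt (a : List Int) (x : Int) (ha : a.Pairwise (· < ·)) :
    pyBisectLeft a x = cntLT a x := by
  have hale : a.Pairwise (· ≤ ·) := ha.imp le_of_lt
  have hnd : a.Nodup := ha.imp ne_of_lt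
  obtain ⟨h0, hlen, hchar⟩ := blLoop_spec a x hale 0 (a.length : Int) (le_refl 0)
    (by omega) (le_refl _) (fun j hj hlt => absurd hlt (by omega))
    (fun j hj hge => absurd hge (by omega))
  have hr : pyBisectLeft a x = blLoop a x 0 (a.length : Int) := by
    unfold pyBisectLeft
    rw [len_eq_int]
  set r := blLoop a x 0 (a.length : Int) with hrdef
  have hcount : a.countP (fun y => decide (y < x)) = r.toNat := by
    apply countP_index
    · omega
    · intro j hj
      have := hchar j hj
      simp only [decide_eq_true_eq]
      omega
  have hfilt : cntLT a x = ((a.filter (fun y => decide (y < x))).length : Int) := by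
    unfold cntLT
    congr 1
    rw [← List.toFinset_card_of_nodup (hnd.filter _), List.toFinset_filter]
    congr 1
    apply Finset.filter_congr
    intro y _
    simp
  rw [hr, hfilt, ← List.countP_eq_length_filter, hcount]
  omega

theorem bisectRight_cnt (a : List Int) (x : Int) (ha : a.Pairwise (· < ·)) :
    PySem.List.len a - pyBisectRight a x = cntGT a x := by
  have hale : a.Pairwise (· ≤ ·) := ha.imp le_of_lt
  have hnd : a.Nodup := ha.imp ne_of_lt
  obtain ⟨h0, hlen, hchar⟩ := brLoop_spec a x hale 0 (a.length : Int) (le_refl 0)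
    (by omega) (le_refl _) (fun j hj hlt => absurd hlt (by omega))
    (fun j hj hge => absurd hge (by omega))
  have hr : pyBisectRight a x = brLoop a x 0 (a.length : Int) := by
    unfold pyBisectRight
    rw [len_eq_int]
  set r := brLoop a x 0 (a.length : Int) with hrdef
  have hcount : a.countP (fun y => decide (y ≤ x)) = r.toNat := by
    apply countP_index
    · omega
    · intro j hj
      have := hchar j hj
      simp only [decide_eq_true_eq]
      omega
  have hsplit : a.length = a.countP (fun y => decide (y ≤ x)) + a.countP (fun y => decide (x < y)) := by
    rw [List.length_eq_countP_add_countP (fun y => decide (y ≤ x))]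
    congr 1
    apply List.countP_congr
    intro y _
    by_cases h : y ≤ x <;> simp [h]
    omega
  have hfilt : cntGT a x = ((a.filter (fun y => decide (x < y))).length : Int) := by
    unfold cntGT
    congr 1
    rw [← List.toFinset_card_of_nodup (hnd.filter _), List.toFinset_filter]
    congr 1
    apply Finset.filter_congr
    intro y _
    simp
  rw [len_eq_int, hr, hfilt, ← List.countP_eq_length_filter]
  omega

theorem insort_sorted (sl : List Int) (x : Int) (hs : sl.Pairwise (· < ·)) (hx : x ∉ sl) :
    (PySem.List.insert sl (pyBisectRight sl x) x).Pairwise (· < ·) ∧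
      (∀ y, y ∈ PySem.List.insert sl (pyBisectRight sl x) x ↔ y = x ∨ y ∈ sl) := by
  have hale : sl.Pairwise (· ≤ ·) := hs.imp le_of_lt
  obtain ⟨h0, hlen, hchar⟩ := brLoop_spec sl x hale 0 (sl.length : Int) (le_refl 0)
    (by omega) (le_refl _) (fun j hj hlt => absurd hlt (by omega))
    (fun j hj hge => absurd hge (by omega))
  have hrq : pyBisectRight sl x = brLoop sl x 0 (sl.length : Int) := by
    unfold pyBisectRight
    rw [len_eq_int]
  set r := brLoop sl x 0 (sl.length : Int) with hrdef
  have hpos : pyBisectRight sl x = ((r.toNat : Nat) : Int) := by omega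
  have hins : PySem.List.insert sl (pyBisectRight sl x) x
      = sl.take r.toNat ++ x :: sl.drop r.toNat := by
    rw [hpos]
    exact PySem.List.insert_natCast sl r.toNat x (by omega)
  have hlt : ∀ (j : Nat) (hj : j < sl.length), j < r.toNat → sl[j] < x := by
    intro j hj hjr
    have hch := (hchar j hj).mp (by omega)
    have hne : sl[j] ≠ x := fun he => hx (he ▸ List.getElem_mem hj)
    omega
  have hgt : ∀ (j : Nat) (hj : j < sl.length), r.toNat ≤ j → x < sl[j] := by
    intro j hj hjr
    have hch := hchar j hj
    omega
  have htake : ∀ y ∈ sl.take r.toNat, y < x := by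
    intro y hy
    obtain ⟨j, hj, hyj⟩ := List.mem_iff_getElem.mp hy
    have hjlen : j < sl.length := by
      have := List.length_take_le (i := r.toNat) (l := sl)
      omega
    rw [List.getElem_take] at hyj
    have hjr : j < r.toNat := by
      have := List.length_take (i := r.toNat) (l := sl)
      omega
    exact hyj ▸ hlt j hjlen hjr
  have hdrop : ∀ y ∈ sl.drop r.toNat, x < y := by
    intro y hy
    obtain ⟨j, hj, hyj⟩ := List.mem_iff_getElem.mp hy
    have hjlen : r.toNat + j < sl.length := by
      have := List.length_drop (i := r.toNat) (l := sl)
      omega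
    rw [List.getElem_drop] at hyj
    exact hyj ▸ hgt (r.toNat + j) hjlen (by omega)
  constructor
  · rw [hins, List.pairwise_append]
    refine ⟨hs.sublist (List.take_sublist _ _), ?_, ?_⟩
    · rw [List.pairwise_cons]
      exact ⟨hdrop, hs.sublist (List.drop_sublist _ _)⟩
    · intro a ha b hb
      rcases List.mem_cons.mp hb with hbx | hbd
      · exact hbx ▸ htake a ha
      · exact lt_trans (htake a ha) (hdrop b hbd)
  · intro y
    rw [hins]
    have hsl : y ∈ sl ↔ y ∈ sl.take r.toNat ∨ y ∈ sl.drop r.toNat := by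
      constructor
      · intro h
        apply List.mem_append.mp
        rw [List.take_append_drop]
        exact h
      · rintro (h | h)
        · exact List.mem_of_mem_take h
        · exact List.mem_of_mem_drop h
    simp only [List.mem_append, List.mem_cons, hsl]
    tauto

theorem cntLT_congr (l l' : List Int) (v : Int) (h : ∀ y, y ∈ l ↔ y ∈ l') :
    cntLT l v = cntLT l' v := by
  have hf : l.toFinset = l'.toFinset := by
    ext y
    simpa using h y
  unfold cntLT
  rw [hf]

theorem cntGT_congr (l l' : List Int) (v : Int) (h : ∀ y, y ∈ l ↔ y ∈ l') :
    cntGT l v = cntGT l' v := by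
  have hf : l.toFinset = l'.toFinset := by
    ext y
    simpa using h y
  unfold cntGT
  rw [hf]

-- state of B's backward sweep after processing indices n-2 down to k+1
def backState (arr : List Int) (k : Int) : PySem.Dict Int Int × List Int × PySem.Set Int :=
  (PySem.List.pyRange ((arr.length : Int) - 2) k (-1)).foldl (backStep arr)
    (PySem.Dict.empty, ([] : List Int), PySem.Set.empty)

theorem back_inv (arr : List Int) :
    ∀ (m : Nat) (k : Int), 0 ≤ k → k ≤ (arr.length : Int) - 2 →
      ((arr.length : Int) - 2 - k).toNat = m →
      (backState arr k).2.1.Pairwise (· < ·) ∧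
      (∀ y, y ∈ (backState arr k).2.1 ↔ y ∈ arr.drop (k+2).toNat) ∧
      (∀ y, y ∈ (backState arr k).2.2 ↔ y ∈ arr.drop (k+2).toNat) ∧
      (∀ i : Int, k+1 ≤ i → i ≤ (arr.length : Int) - 2 →
        PySem.Dict.getD (backState arr k).1 i 0
          = cntLT (arr.drop (i.toNat+1)) (PySem.List.pyGetD arr i 0)) := by
  intro m
  induction m with
  | zero =>
    intro k hk0 hk2 hm
    have hke : k = (arr.length : Int) - 2 := by omega
    have hnil : backState arr k = (PySem.Dict.empty, ([] : List Int), PySem.Set.empty) := by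
      unfold backState
      rw [PySem.List.pyRange_neg_one_eq_nil (by omega)]
      rfl
    rw [hnil]
    have hdrop : arr.drop (k+2).toNat = [] := List.drop_eq_nil_of_le (by omega)
    refine ⟨List.Pairwise.nil, ?_, ?_, ?_⟩
    · intro y; rw [hdrop]
    · intro y; rw [hdrop]; exact Iff.rfl
    · intro i hi1 hi2; omega
  | succ m ih =>
    intro k hk0 hk2 hm
    have hklt : k < (arr.length : Int) - 2 := by omega
    -- split off the last processed index k+1
    have hsplit : PySem.List.pyRange ((arr.length : Int) - 2) k (-1)
        = PySem.List.pyRange ((arr.length : Int) - 2) (k+1) (-1) ++ [k+1] := by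
      rw [PySem.List.pyRange_neg_one_eq_reverse ((arr.length : Int) - 2) k,
          PySem.List.pyRange_one_cons (by omega : k + 1 < (arr.length : Int) - 2 + 1),
          List.reverse_cons, PySem.List.pyRange_neg_one_eq_reverse ((arr.length : Int) - 2) (k+1)]
    have hstate : backState arr k = backStep arr (backState arr (k+1)) (k+1) := by
      unfold backState
      rw [hsplit, List.foldl_append]
      rfl
    obtain ⟨ihpw, ihsl, ihpr, ihD⟩ := ih (k+1) (by omega) (by omega) (by omega)
    set st := backState arr (k+1) with hstdef
    have hlen : ((k+2).toNat) < arr.length := by omega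
    have hxv : PySem.List.pyGetD arr (k+1+1) 0 = arr[(k+2).toNat] := by
      have he : (k+1+1 : Int) = k+2 := by ring
      rw [he]
      exact PySem.List.pyGetD_eq_getElem arr 0 (by omega) (by omega)
    have hnat : (k+2).toNat + 1 = ((k+1)+2).toNat := by omega
    have hdropc : arr.drop (k+2).toNat = arr[(k+2).toNat] :: arr.drop ((k+1)+2).toNat := by
      rw [← hnat]
      exact List.drop_eq_getElem_cons hlen
    have hmemd : ∀ y, y ∈ arr.drop (k+2).toNat
        ↔ y = arr[(k+2).toNat] ∨ y ∈ arr.drop ((k+1)+2).toNat := by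
      intro y
      rw [hdropc]
      simp
    rw [hstate]
    unfold backStep
    rw [hxv]
    dsimp only
    by_cases hc : PySem.Set.contains st.2.2 (arr[(k+2).toNat]) = true
    · rw [if_pos hc]
      have hxin : arr[(k+2).toNat] ∈ arr.drop ((k+1)+2).toNat := by
        rw [← ihpr]
        simpa [PySem.Set.contains, List.contains_iff_mem] using hc
      have hslk : ∀ y, y ∈ st.2.1 ↔ y ∈ arr.drop (k+2).toNat := by
        intro y
        rw [ihsl, hmemd]
        constructor
        · exact Or.inr
        · rintro (rfl | h)
          · exact hxin
          · exact h
      have hprk : ∀ y, y ∈ st.2.2 ↔ y ∈ arr.drop (k+2).toNat := by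
        intro y
        rw [ihpr, hmemd]
        constructor
        · exact Or.inr
        · rintro (rfl | h)
          · exact hxin
          · exact h
      refine ⟨ihpw, hslk, hprk, ?_⟩
      intro i hi1 hi2
      rcases eq_or_ne i (k+1) with rfl | hne
      · rw [PySem.Dict.getD_insert, if_pos rfl]
        rw [bisectLeft_cnt st.2.1 _ ihpw]
        have hnn : (k+1).toNat + 1 = (k+2).toNat := by omega
        rw [cntLT_congr st.2.1 (arr.drop (k+2).toNat) _ hslk, hnn]
      · rw [PySem.Dict.getD_insert, if_neg hne]
        exact ihD i (by omega) hi2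
    · rw [if_neg hc]
      have hxnotp : arr[(k+2).toNat] ∉ st.2.2 := by
        intro h
        exact hc (by simpa [PySem.Set.contains, List.contains_iff_mem] using h)
      have hxnotd : arr[(k+2).toNat] ∉ arr.drop ((k+1)+2).toNat := by
        rw [← ihpr]
        exact hxnotp
      have hxnots : arr[(k+2).toNat] ∉ st.2.1 := by
        rw [ihsl]
        exact hxnotd
      obtain ⟨hpw', hmem'⟩ := insort_sorted st.2.1 (arr[(k+2).toNat]) ihpw hxnots
      have hslk : ∀ y, y ∈ PySem.List.insert st.2.1 (pyBisectRight st.2.1 (arr[(k+2).toNat]))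
          (arr[(k+2).toNat]) ↔ y ∈ arr.drop (k+2).toNat := by
        intro y
        rw [hmem' y, hmemd, ihsl]
      have hprk : ∀ y, y ∈ PySem.Set.add st.2.2 (arr[(k+2).toNat]) ↔ y ∈ arr.drop (k+2).toNat := by
        intro y
        rw [PySem.Set.mem_add, hmemd, ihpr]
        tauto
      refine ⟨hpw', hslk, hprk, ?_⟩
      intro i hi1 hi2
      rcases eq_or_ne i (k+1) with rfl | hne
      · rw [PySem.Dict.getD_insert, if_pos rfl]
        rw [bisectLeft_cnt _ _ hpw']
        have hnn : (k+1).toNat + 1 = (k+2).toNat := by omega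
        rw [cntLT_congr _ (arr.drop (k+2).toNat) _ hslk, hnn]
      · rw [PySem.Dict.getD_insert, if_neg hne]
        exact ihD i (by omega) hi2

theorem fwd_inv (arr : List Int) (D : PySem.Dict Int Int)
    (hD : ∀ i : Int, 1 ≤ i → i ≤ (arr.length : Int) - 2 →
        PySem.Dict.getD D i 0 = cntLT (arr.drop (i.toNat+1)) (PySem.List.pyGetD arr i 0)) :
    ∀ (m : Nat) (k : Int), 1 ≤ k → k ≤ (arr.length : Int) - 1 →
      ((arr.length : Int) - 1 - k).toNat = m →
      ∀ (res : Int) (sl : List Int) (present seen : PySem.Set Int),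
        sl.Pairwise (· < ·) →
        (∀ y, y ∈ sl ↔ y ∈ arr.take (k-1).toNat) →
        (∀ y, y ∈ present ↔ y ∈ arr.take (k-1).toNat) →
        ((PySem.List.pyRange k ((arr.length : Int) - 1) 1).foldl (fwdStep arr D)
            (res, sl, present, seen)).1
          = ((PySem.List.pyRange k ((arr.length : Int) - 1) 1).foldl (midStep arr)
              (res, seen)).1 := by
  intro m
  induction m with
  | zero =>
    intro k hk1 hk2 hm res sl present seen _ _ _
    rw [PySem.List.pyRange_one_eq_nil (by omega)]
    rfl
  | succ m ih =>
    intro k hk1 hk2 hm res sl present seen hpw hsl hpr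
    have hkl : k < (arr.length : Int) - 1 := by omega
    have hlen1 : (k-1).toNat < arr.length := by omega
    have hx : PySem.List.pyGetD arr (k-1) 0 = arr[(k-1).toNat] :=
      PySem.List.pyGetD_eq_getElem arr 0 (by omega) (by omega)
    have hkk : k.toNat = (k-1).toNat + 1 := by omega
    have hk11 : (k+1-1 : Int) = k := by ring
    have htk : arr.take k.toNat = arr.take (k-1).toNat ++ [arr[(k-1).toNat]] := by
      rw [hkk, List.take_add_one, List.getElem?_eq_getElem hlen1]
      rfl
    have hmemt : ∀ y, y ∈ arr.take k.toNat ↔ y ∈ arr.take (k-1).toNat ∨ y = arr[(k-1).toNat] := by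
      intro y
      rw [htk, List.mem_append, List.mem_singleton]
    rw [PySem.List.pyRange_one_cons hkl]
    simp only [List.foldl_cons]
    by_cases hcp : PySem.Set.contains present (arr[(k-1).toNat]) = true
    · -- arr[k-1] already recorded
      have hxin : arr[(k-1).toNat] ∈ arr.take (k-1).toNat := by
        rw [← hpr]
        simpa [PySem.Set.contains, List.contains_iff_mem] using hcp
      have hsl' : ∀ y, y ∈ sl ↔ y ∈ arr.take k.toNat := by
        intro y
        rw [hsl, hmemt]
        constructor
        · exact Or.inl
        · rintro (h | rfl)
          · exact h
          · exact hxin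
      have hpr' : ∀ y, y ∈ present ↔ y ∈ arr.take k.toNat := by
        intro y
        rw [hpr, hmemt]
        constructor
        · exact Or.inl
        · rintro (h | rfl)
          · exact h
          · exact hxin
      by_cases hcs : PySem.Set.contains seen (PySem.List.pyGetD arr k 0) = true
      · rw [show fwdStep arr D (res, sl, present, seen) k = (res, sl, present, seen) from by
          unfold fwdStep; dsimp only; rw [hx, if_pos hcp, if_pos hcs]]
        rw [show midStep arr (res, seen) k = (res, seen) from by
          unfold midStep; dsimp only; rw [if_pos hcs]]
        exact ih (k+1) (by omega) (by omega) (by omega) res sl present seen hpw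
          (fun y => by rw [hk11]; exact hsl' y) (fun y => by rw [hk11]; exact hpr' y)
      · have hval : PySem.Dict.getD D k 0
            * (PySem.List.len sl - pyBisectRight sl (PySem.List.pyGetD arr k 0))
            = cntLT (arr.drop (k.toNat+1)) (PySem.List.pyGetD arr k 0)
              * cntGT (arr.take k.toNat) (PySem.List.pyGetD arr k 0) := by
          rw [hD k hk1 (by omega), bisectRight_cnt sl _ hpw,
              cntGT_congr sl (arr.take k.toNat) _ hsl']
        rw [show fwdStep arr D (res, sl, present, seen) k
            = (res + cntLT (arr.drop (k.toNat+1)) (PySem.List.pyGetD arr k 0)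
                * cntGT (arr.take k.toNat) (PySem.List.pyGetD arr k 0), sl, present,
               PySem.Set.add seen (PySem.List.pyGetD arr k 0)) from by
          unfold fwdStep; dsimp only; rw [hx, if_pos hcp, if_neg hcs, hval]]
        rw [show midStep arr (res, seen) k
            = (res + cntLT (arr.drop (k.toNat+1)) (PySem.List.pyGetD arr k 0)
                * cntGT (arr.take k.toNat) (PySem.List.pyGetD arr k 0),
               PySem.Set.add seen (PySem.List.pyGetD arr k 0)) from by
          unfold midStep; dsimp only; rw [if_neg hcs]]
        exact ih (k+1) (by omega) (by omega) (by omega) _ sl present _ hpw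
          (fun y => by rw [hk11]; exact hsl' y) (fun y => by rw [hk11]; exact hpr' y)
    · -- arr[k-1] is new: it is inserted into the sorted list
      have hxnot : arr[(k-1).toNat] ∉ arr.take (k-1).toNat := by
        rw [← hpr]
        intro h
        exact hcp (by simpa [PySem.Set.contains, List.contains_iff_mem] using h)
      have hxnots : arr[(k-1).toNat] ∉ sl := by
        rw [hsl]
        exact hxnot
      obtain ⟨hpw', hmem'⟩ := insort_sorted sl (arr[(k-1).toNat]) hpw hxnots
      set SL := PySem.List.insert sl (pyBisectRight sl (arr[(k-1).toNat])) (arr[(k-1).toNat])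
        with hSL
      have hsl' : ∀ y, y ∈ SL ↔ y ∈ arr.take k.toNat := by
        intro y
        rw [hmem' y, hmemt, hsl]
        tauto
      have hpr' : ∀ y, y ∈ PySem.Set.add present (arr[(k-1).toNat]) ↔ y ∈ arr.take k.toNat := by
        intro y
        rw [PySem.Set.mem_add, hmemt, hpr]
      by_cases hcs : PySem.Set.contains seen (PySem.List.pyGetD arr k 0) = true
      · rw [show fwdStep arr D (res, sl, present, seen) k
            = (res, SL, PySem.Set.add present (arr[(k-1).toNat]), seen) from by
          unfold fwdStep; dsimp only; rw [hx, if_neg hcp, if_pos hcs]]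
        rw [show midStep arr (res, seen) k = (res, seen) from by
          unfold midStep; dsimp only; rw [if_pos hcs]]
        exact ih (k+1) (by omega) (by omega) (by omega) res SL _ seen hpw'
          (fun y => by rw [hk11]; exact hsl' y) (fun y => by rw [hk11]; exact hpr' y)
      · have hval : PySem.Dict.getD D k 0
            * (PySem.List.len SL - pyBisectRight SL (PySem.List.pyGetD arr k 0))
            = cntLT (arr.drop (k.toNat+1)) (PySem.List.pyGetD arr k 0)
              * cntGT (arr.take k.toNat) (PySem.List.pyGetD arr k 0) := by
          rw [hD k hk1 (by omega), bisectRight_cnt SL _ hpw',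
              cntGT_congr SL (arr.take k.toNat) _ hsl']
        rw [show fwdStep arr D (res, sl, present, seen) k
            = (res + cntLT (arr.drop (k.toNat+1)) (PySem.List.pyGetD arr k 0)
                * cntGT (arr.take k.toNat) (PySem.List.pyGetD arr k 0), SL,
               PySem.Set.add present (arr[(k-1).toNat]),
               PySem.Set.add seen (PySem.List.pyGetD arr k 0)) from by
          unfold fwdStep; dsimp only; rw [hx, if_neg hcp, if_neg hcs, hval]]
        rw [show midStep arr (res, seen) k
            = (res + cntLT (arr.drop (k.toNat+1)) (PySem.List.pyGetD arr k 0)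
                * cntGT (arr.take k.toNat) (PySem.List.pyGetD arr k 0),
               PySem.Set.add seen (PySem.List.pyGetD arr k 0)) from by
          unfold midStep; dsimp only; rw [if_neg hcs]]
        exact ih (k+1) (by omega) (by omega) (by omega) _ SL _ _ hpw'
          (fun y => by rw [hk11]; exact hsl' y) (fun y => by rw [hk11]; exact hpr' y)

theorem B_eq_mid (arr : List Int) :
    inversions2_alt arr
      = ((PySem.List.pyRange 1 (PySem.List.len arr - 1) 1).foldl (midStep arr)
          ((0:Int), PySem.Set.empty)).1 := by
  unfold inversions2_alt
  dsimp only
  rw [len_eq_int]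
  by_cases hn : 3 ≤ (arr.length : Int)
  · obtain ⟨_, _, _, hD⟩ := back_inv arr ((arr.length : Int) - 2 - 0).toNat 0 (by omega)
      (by omega) rfl
    exact fwd_inv arr (backState arr 0).1 (fun i hi1 hi2 => hD i (by omega) hi2)
      ((arr.length : Int) - 1 - 1).toNat 1 (by omega) (by omega) rfl 0 [] PySem.Set.empty
      PySem.Set.empty List.Pairwise.nil (fun y => by simp) (fun y => by simp)
  · rw [PySem.List.pyRange_one_eq_nil (by omega : (arr.length : Int) - 1 ≤ 1)]
    rfl

-- ===== VERDICT (by name: the statement is the Claim_ definition above) =====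
theorem inversions2_spec : Claim_equal_inversions2 := by
  intro arr _
  unfold Spec_inversions2
  rw [A_eq_mid, B_eq_mid]
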